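-- pv_equiv track=rewrite | github.com/jontosh/drivingschool | backend/abstracts/custom_context.py | group_urls_by_root
-- ===== SOURCE A (Python) =====
-- def group_urls_by_root(urls):
--     url_dict = {}
--
--     for url in urls:
--         root = url.split('/')[0]  # Get the root URL
--         if root not in url_dict:
--             url_dict[root] = []
--         url_dict[root].append(url)
--
--     return url_dict
-- ===== SOURCE B (Python) =====
-- def group_urls_by_root(urls):
--     roots = dict.fromkeys(u.split('/')[0] for u in urls)
--     return {r: [u for u in urls if u.split('/')[0] == r] for r in roots}
-- ===== Notes on version B (the rewrite author's own statement) =====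
-- stated objective: alternative
-- what changed: Replaces the one-pass dict accumulation with a two-phase strategy: dedup the root keys in first-occurrence order (dict.fromkeys), then build each group by filtering the whole list once per root; this trades speed (O(n*k) vs A's O(n)) for a declarative per-key construction.
import Mathlib
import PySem

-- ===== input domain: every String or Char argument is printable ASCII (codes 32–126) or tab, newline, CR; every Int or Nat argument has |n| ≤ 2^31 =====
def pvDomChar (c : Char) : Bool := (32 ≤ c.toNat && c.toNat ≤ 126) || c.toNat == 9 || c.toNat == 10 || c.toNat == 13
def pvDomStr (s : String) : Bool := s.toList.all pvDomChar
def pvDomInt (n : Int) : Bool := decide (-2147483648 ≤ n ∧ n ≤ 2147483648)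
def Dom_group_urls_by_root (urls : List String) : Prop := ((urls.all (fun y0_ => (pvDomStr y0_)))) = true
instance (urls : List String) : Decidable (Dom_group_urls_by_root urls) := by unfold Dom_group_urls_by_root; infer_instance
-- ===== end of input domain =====

-- B replaces A's one-pass dict accumulation by deduping the root keys first and then
-- filtering the whole list once per root (alternative decomposition, same results).

-- ===== PORT A =====
-- url.split('/')[0]: split? is some (sep "/" ≠ "") and always returns a nonempty list,
-- so index 0 is in range and the defaults are never used (exact).
def pvRoot (u : String) : String :=
  PySem.List.pyGetD ((PySem.Str.split? u "/").getD []) 0 ""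

def group_urls_by_root (urls : List String) : List (String × List String) :=
  (urls.foldl (fun url_dict url =>
      let root := pvRoot url
      let url_dict := if url_dict.contains root then url_dict
                      else url_dict.insert root []
      url_dict.modify root [] (fun l => l ++ [url]))
    PySem.Dict.empty).items

-- ===== PORT B =====
def group_urls_by_root_alt (urls : List String) : List (String × List String) :=
  let roots := PySem.List.dedup (urls.map pvRoot)
  roots.map (fun r => (r, urls.filter (fun u => pvRoot u == r)))

-- ===== PRECONDITION & SPEC =====
def Spec_group_urls_by_root (urls : List String) (out : List (String × List String)) : Prop := out = group_urls_by_root_alt urls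
instance (urls : List String) (out : List (String × List String)) : Decidable (Spec_group_urls_by_root urls out) := by unfold Spec_group_urls_by_root; infer_instance

-- ===== CLAIM (what is proved, stated in full; the proofs are below) =====
def Claim_equal_group_urls_by_root : Prop := ∀ (urls : List String), Dom_group_urls_by_root urls → Spec_group_urls_by_root urls (group_urls_by_root urls)

-- ===== LEMMAS AND PROOFS =====

-- A's loop body ("if root not in d: d[root] = []; d[root].append(url)") is exactly
-- d.modify root [] (· ++ [url]).
theorem pv_step_eq (d : PySem.Dict String (List String)) (url : String) :
    (let root := pvRoot url
     let d' := if d.contains root then d else d.insert root []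
     d'.modify root [] (fun l => l ++ [url]))
    = d.modify (pvRoot url) [] (fun l => l ++ [url]) := by
  by_cases h : d.contains (pvRoot url)
  · simp [h]
  · simp only [h, if_neg, Bool.not_eq_true]
    simp only [PySem.Dict.modify, PySem.Dict.getD_insert_self,
      PySem.Dict.insert_insert_self]
    congr 1
    simp [PySem.Dict.getD, (PySem.Dict.get?_eq_none_iff_contains d (pvRoot url)).mpr (by simpa using h)]

theorem pv_foldl_eq (urls : List String) :
    urls.foldl (fun url_dict url =>
      let root := pvRoot url
      let url_dict := if url_dict.contains root then url_dict
                      else url_dict.insert root []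
      url_dict.modify root [] (fun l => l ++ [url])) PySem.Dict.empty
    = (urls.map (fun u => (pvRoot u, u))).foldl
        (fun d p => d.modify p.1 [] (fun l => l ++ [p.2])) PySem.Dict.empty := by
  rw [List.foldl_map]
  exact List.foldl_ext _ _ _ (fun d u _ => pv_step_eq d u)

-- ===== VERDICT (by name: the statement is the Claim_ definition above) =====
theorem group_urls_by_root_spec : Claim_equal_group_urls_by_root := by
  intro urls _
  unfold Spec_group_urls_by_root group_urls_by_root group_urls_by_root_alt
  rw [pv_foldl_eq]
  set d := (urls.map (fun u => (pvRoot u, u))).foldl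
      (fun d p => d.modify p.1 [] (fun l => l ++ [p.2])) PySem.Dict.empty with hd
  have hkeys : d.keys = PySem.List.dedup (urls.map pvRoot) := by
    rw [hd]
    have h := PySem.Dict.keys_foldl_modify_key (urls.map (fun u => (pvRoot u, u)))
      (fun p => p.1) ([] : List String) (fun _ p l => l ++ [p.2]) PySem.Dict.empty
    simp only [PySem.List.dedup_eq_ofList, PySem.Set.ofList_eq_foldl]
    rw [h]
    simp [PySem.Set.update, List.map_map, Function.comp_def]
  have hnd : d.keys.Nodup := by
    rw [hkeys, PySem.List.dedup_eq_ofList]; exact PySem.Set.nodup_ofList _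
  rw [PySem.Dict.items_eq_map_keys d hnd ([] : List String), hkeys]
  apply List.map_congr_left
  intro r _
  have hg := PySem.Dict.getD_foldl_modify_append
      (urls.map (fun u => (pvRoot u, u))) PySem.Dict.empty r
  rw [hg]
  simp [List.filter_map, List.map_map, Function.comp_def]
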